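-- pv_equiv track=rewrite | github.com/DarkBall123/PPP_24-25_4sem | 2lab/app/services/fuzzy_search.py | perform_fuzzy_search
-- ===== SOURCE A (Python) =====
-- def levenshtein_distance(a: str, b: str) -> int:
--     """
--     Классическое расстояние Левенштейна между строками a и b.
--     Возвращает количество правок (вставка, удаление, замена).
--     """
--     # если одна из строк пустая
--     if not a:
--         return len(b)
--     if not b:
--         return len(a)
--
--     # создаём матрицу (len(a)+1) * (len(b)+1)
--     dp = [[0] * (len(b) + 1) for _ in range(len(a) + 1)]
--
--     # инициализация первой строки/столбца
--     for i in range(len(a) + 1):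
--         dp[i][0] = i
--     for j in range(len(b) + 1):
--         dp[0][j] = j
--
--     # заполнение матрицы
--     for i in range(1, len(a) + 1):
--         for j in range(1, len(b) + 1):
--             cost = 0 if a[i - 1] == b[j - 1] else 1
--             dp[i][j] = min(
--                 dp[i - 1][j] + 1,  # удаление
--                 dp[i][j - 1] + 1,  # вставка
--                 dp[i - 1][j - 1] + cost  # замена (или совпадение)
--             )
--     return dp[len(a)][len(b)]
--
-- def damerau_levenshtein_distance(a: str, b: str) -> int:
--     """
--     Расстояние Дамерау-Левенштейна.
--     Включает операцию перестановки двух соседних символов.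
--     """
--     if not a:
--         return len(b)
--     if not b:
--         return len(a)
--
--     dp = [[0] * (len(b) + 1) for _ in range(len(a) + 1)]
--
--     for i in range(len(a) + 1):
--         dp[i][0] = i
--     for j in range(len(b) + 1):
--         dp[0][j] = j
--
--     for i in range(1, len(a) + 1):
--         for j in range(1, len(b) + 1):
--             cost = 0 if a[i - 1] == b[j - 1] else 1
--             dp[i][j] = min(
--                 dp[i - 1][j] + 1,  # удаление
--                 dp[i][j - 1] + 1,  # вставка
--                 dp[i - 1][j - 1] + cost  # замена/совпадение
--             )
--             # если возможна перестановка (i>1, j>1) и символы соответствуют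
--             if i > 1 and j > 1 and a[i - 1] == b[j - 2] and a[i - 2] == b[j - 1]:
--                 dp[i][j] = min(dp[i][j], dp[i - 2][j - 2] + 1)  # перестановка
--
--     return dp[len(a)][len(b)]
--
-- def perform_fuzzy_search(word: str, text: str, algorithm: str):
--     """
--     Разбиваем text на слова (например, по пробелам/знакам),
--     вычисляем расстояние до каждого слова, сортируем и возвращаем результат.
--     :param word: искомое слово
--     :param text: весь текст корпуса
--     :param algorithm: "levenshtein" или "damerau"
--     :return: список кортежей (word_in_text, distance)
--     """
--     # разобьём текст тупо по пробелам и знакам пунктуации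
--     tokens = text.split()
--
--     results = []
--     if algorithm == "levenshtein":
--         distance_func = levenshtein_distance
--     elif algorithm == "damerau":
--         distance_func = damerau_levenshtein_distance
--     else:
--         raise ValueError(f"Unknown algorithm: {algorithm}")
--
--     for token in tokens:
--         dist = distance_func(word, token)
--         results.append((token, dist))
--
--     # сортируем по distance
--     results.sort(key=lambda x: x[1])
--     return results
-- ===== SOURCE B (Python) =====
-- def perform_fuzzy_search(word: str, text: str, algorithm: str):
--     if algorithm == "levenshtein":
--         trans = False
--     elif algorithm == "damerau":
--         trans = True
--     else:
--         raise ValueError(f"Unknown algorithm: {algorithm}")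
--
--     def distance(token):
--         # top-down memoized recursion on the edit-distance recurrence
--         memo = {}
--
--         def d(i, j):
--             if i == 0:
--                 return j
--             if j == 0:
--                 return i
--             v = memo.get((i, j))
--             if v is not None:
--                 return v
--             v = min(d(i - 1, j) + 1,
--                     d(i, j - 1) + 1,
--                     d(i - 1, j - 1) + (word[i - 1] != token[j - 1]))
--             if trans and i > 1 and j > 1 and word[i - 1] == token[j - 2] \
--                     and word[i - 2] == token[j - 1]:
--                 v = min(v, d(i - 2, j - 2) + 1)
--             memo[(i, j)] = v
--             return v
--
--         return d(len(word), len(token))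
--
--     pairs = [(t, distance(t)) for t in text.split()]
--     # bucket the pairs by their distance value instead of sorting them:
--     # emit, for each distinct distance in increasing order, the pairs
--     # carrying it in their original order (= the stable sort by distance)
--     out = []
--     for k in sorted({d for _, d in pairs}):
--         for p in pairs:
--             if p[1] == k:
--                 out.append(p)
--     return out
-- ===== Notes on version B (the rewrite author's own statement) =====
-- stated objective: alternative
-- what changed: B replaces A's two bottom-up full-matrix DP functions by one top-down memoized recursion on the recurrence d(i,j) (demand-driven evaluation with a (i,j)-keyed memo dict, transposition as an extra branch under a flag), and replaces A's comparison sort of the (token, distance) pairs by bucket grouping: it emits, for each distinct distance value in increasing order, the pairs carrying it in their original order.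
import Mathlib
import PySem

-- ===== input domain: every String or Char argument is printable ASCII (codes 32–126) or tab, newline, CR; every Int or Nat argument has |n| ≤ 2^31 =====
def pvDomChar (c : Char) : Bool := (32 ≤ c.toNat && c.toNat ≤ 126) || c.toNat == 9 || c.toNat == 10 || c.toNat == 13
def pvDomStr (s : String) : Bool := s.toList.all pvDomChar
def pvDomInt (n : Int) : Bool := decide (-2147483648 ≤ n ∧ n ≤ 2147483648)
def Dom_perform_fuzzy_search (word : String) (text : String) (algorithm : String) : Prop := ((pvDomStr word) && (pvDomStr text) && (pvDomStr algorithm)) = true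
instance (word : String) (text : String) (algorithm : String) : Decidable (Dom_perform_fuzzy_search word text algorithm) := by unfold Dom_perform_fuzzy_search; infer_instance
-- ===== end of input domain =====

-- B: one top-down memoized recursion on the edit-distance recurrence (instead of two bottom-up
-- full-matrix DP functions) and a bucket-grouping driver (pairs emitted per distinct distance in
-- increasing order) instead of a comparison sort; same return value on every admitted input.


-- ===== PORT A =====
-- A-side helpers: Python's dp[i][j] read and dp[i][j] = v write (every use below is in range)
def pvMGet (dp : List (List Int)) (i j : Nat) : Int := (dp.getD i []).getD j 0

def pvMSet (dp : List (List Int)) (i j : Nat) (v : Int) : List (List Int) :=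
  dp.set i ((dp.getD i []).set j v)

def levenshtein_distance (a : String) (b : String) : Int :=
  let al := a.toList
  let bl := b.toList
  if al = [] then (bl.length : Int)
  else if bl = [] then (al.length : Int)
  else
    let dp0 := List.replicate (al.length + 1) (List.replicate (bl.length + 1) (0 : Int))
    let dp1 := (List.range (al.length + 1)).foldl (fun dp i => pvMSet dp i 0 (i : Int)) dp0
    let dp2 := (List.range (bl.length + 1)).foldl (fun dp j => pvMSet dp 0 j (j : Int)) dp1
    let dp3 := (List.range' 1 al.length).foldl (fun dp i =>
      (List.range' 1 bl.length).foldl (fun dp j =>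
        let cost : Int := if al.getD (i - 1) ' ' = bl.getD (j - 1) ' ' then 0 else 1
        let v := min (min (pvMGet dp (i - 1) j + 1) (pvMGet dp i (j - 1) + 1))
                     (pvMGet dp (i - 1) (j - 1) + cost)
        pvMSet dp i j v) dp) dp2
    pvMGet dp3 al.length bl.length

def damerau_levenshtein_distance (a : String) (b : String) : Int :=
  let al := a.toList
  let bl := b.toList
  if al = [] then (bl.length : Int)
  else if bl = [] then (al.length : Int)
  else
    let dp0 := List.replicate (al.length + 1) (List.replicate (bl.length + 1) (0 : Int))
    let dp1 := (List.range (al.length + 1)).foldl (fun dp i => pvMSet dp i 0 (i : Int)) dp0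
    let dp2 := (List.range (bl.length + 1)).foldl (fun dp j => pvMSet dp 0 j (j : Int)) dp1
    let dp3 := (List.range' 1 al.length).foldl (fun dp i =>
      (List.range' 1 bl.length).foldl (fun dp j =>
        let cost : Int := if al.getD (i - 1) ' ' = bl.getD (j - 1) ' ' then 0 else 1
        let v := min (min (pvMGet dp (i - 1) j + 1) (pvMGet dp i (j - 1) + 1))
                     (pvMGet dp (i - 1) (j - 1) + cost)
        let dp' := pvMSet dp i j v
        if 1 < i ∧ 1 < j ∧ al.getD (i - 1) ' ' = bl.getD (j - 2) ' ' ∧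
            al.getD (i - 2) ' ' = bl.getD (j - 1) ' ' then
          pvMSet dp' i j (min (pvMGet dp' i j) (pvMGet dp' (i - 2) (j - 2) + 1))
        else dp') dp) dp2
    pvMGet dp3 al.length bl.length

def perform_fuzzy_search (word : String) (text : String) (algorithm : String) : List (String × Int) :=
  let tokens := PySem.Str.split₀ text
  if algorithm = "levenshtein" ∨ algorithm = "damerau" then
    let distance_func : String → String → Int :=
      if algorithm = "levenshtein" then levenshtein_distance else damerau_levenshtein_distance
    let results := tokens.foldl (fun r token => r ++ [(token, distance_func word token)]) []
    PySem.List.sorted results (fun x => x.2)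
  else []  -- Python: raise ValueError (excluded by Pre_)

-- ===== PORT B =====
-- B's inner d(i, j): top-down recursion threading the memo dict keyed (i, j)
def pvMemoD (trans : Bool) (al bl : List Char) :
    Nat → Nat → PySem.Dict (Nat × Nat) Int → Int × PySem.Dict (Nat × Nat) Int
  | 0, j, m => ((j : Int), m)
  | i + 1, 0, m => ((i : Int) + 1, m)
  | i + 1, j + 1, m =>
    match m.get? (i + 1, j + 1) with
    | some v => (v, m)
    | none =>
      let r1 := pvMemoD trans al bl i (j + 1) m
      let r2 := pvMemoD trans al bl (i + 1) j r1.2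
      let r3 := pvMemoD trans al bl i j r2.2
      let v := min (min (r1.1 + 1) (r2.1 + 1))
                   (r3.1 + if al.getD i ' ' ≠ bl.getD j ' ' then 1 else 0)
      if trans = true ∧ 0 < i ∧ 0 < j ∧ al.getD i ' ' = bl.getD (j - 1) ' ' ∧
          al.getD (i - 1) ' ' = bl.getD j ' ' then
        let r4 := pvMemoD trans al bl (i - 1) (j - 1) r3.2
        let v' := min v (r4.1 + 1)
        (v', r4.2.insert (i + 1, j + 1) v')
      else (v, r3.2.insert (i + 1, j + 1) v)
termination_by i j _ => i + j
decreasing_by all_goals omega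

-- B's distance(token): run d(len(word), len(token)) on a fresh memo
def pvDistB (word token : String) (trans : Bool) : Int :=
  (pvMemoD trans word.toList token.toList word.toList.length token.toList.length
    PySem.Dict.empty).1

-- B's driver: pairs, then for each distinct distance in increasing order append the pairs carrying it
def pvSearchB (word : String) (text : String) (trans : Bool) : List (String × Int) :=
  let pairs := (PySem.Str.split₀ text).map (fun t => (t, pvDistB word t trans))
  let ks := PySem.List.sorted (PySem.Set.ofList (pairs.map (fun p => p.2))) (fun x => x)
  ks.foldl (fun out k =>
    pairs.foldl (fun out p => if p.2 == k then out ++ [p] else out) out) []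

def perform_fuzzy_search_alt (word : String) (text : String) (algorithm : String) : List (String × Int) :=
  if algorithm = "levenshtein" then pvSearchB word text false
  else if algorithm = "damerau" then pvSearchB word text true
  else []  -- Python: raise ValueError (excluded by Pre_)

-- ===== PRECONDITION & SPEC =====
-- A (and B alike) raises ValueError on any algorithm other than these two; nothing else raises.
def Pre_perform_fuzzy_search (word : String) (text : String) (algorithm : String) : Prop :=
  algorithm = "levenshtein" ∨ algorithm = "damerau"

instance (word : String) (text : String) (algorithm : String) :
    Decidable (Pre_perform_fuzzy_search word text algorithm) := by
  unfold Pre_perform_fuzzy_search; infer_instance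

def pvWitness_perform_fuzzy_search : String × String × String :=
  ("cat", "cut act tack cat", "damerau")

def Spec_perform_fuzzy_search (word : String) (text : String) (algorithm : String)
    (out : List (String × Int)) : Prop := out = perform_fuzzy_search_alt word text algorithm

instance (word : String) (text : String) (algorithm : String) (out : List (String × Int)) :
    Decidable (Spec_perform_fuzzy_search word text algorithm out) := by
  unfold Spec_perform_fuzzy_search; infer_instance

-- ===== CLAIM (what is proved, stated in full; the proofs are below) =====
def Claim_equal_perform_fuzzy_search : Prop :=
  ∀ (word : String) (text : String) (algorithm : String),
    Dom_perform_fuzzy_search word text algorithm →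
    Pre_perform_fuzzy_search word text algorithm →
    Spec_perform_fuzzy_search word text algorithm (perform_fuzzy_search word text algorithm)

-- ===== LEMMAS AND PROOFS =====

-- the edit-distance recurrence both programs compute (trans adds the transposition step)
def pvD (trans : Bool) (al bl : List Char) : Nat → Nat → Int
  | 0, j => (j : Int)
  | i + 1, 0 => (i : Int) + 1
  | i + 1, j + 1 =>
    let cost : Int := if al.getD i ' ' = bl.getD j ' ' then 0 else 1
    let v := min (min (pvD trans al bl i (j + 1) + 1) (pvD trans al bl (i + 1) j + 1))
                 (pvD trans al bl i j + cost)
    if trans = true ∧ 0 < i ∧ 0 < j ∧ al.getD i ' ' = bl.getD (j - 1) ' ' ∧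
        al.getD (i - 1) ' ' = bl.getD j ' ' then
      min v (pvD trans al bl (i - 1) (j - 1) + 1)
    else v
termination_by i j => i + j
decreasing_by all_goals omega

lemma pvD_zero_left (trans : Bool) (al bl : List Char) (j : Nat) :
    pvD trans al bl 0 j = (j : Int) := by simp [pvD]

lemma pvD_zero_right (trans : Bool) (al bl : List Char) (i : Nat) :
    pvD trans al bl i 0 = (i : Int) := by
  cases i <;> simp [pvD]

lemma pvD_pos (trans : Bool) (al bl : List Char) (i j : Nat) (hi : 1 ≤ i) (hj : 1 ≤ j) :
    pvD trans al bl i j =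
      (let cost : Int := if al.getD (i - 1) ' ' = bl.getD (j - 1) ' ' then 0 else 1
       let v := min (min (pvD trans al bl (i - 1) j + 1) (pvD trans al bl i (j - 1) + 1))
                    (pvD trans al bl (i - 1) (j - 1) + cost)
       if trans = true ∧ 1 < i ∧ 1 < j ∧ al.getD (i - 1) ' ' = bl.getD (j - 2) ' ' ∧
           al.getD (i - 2) ' ' = bl.getD (j - 1) ' ' then
         min v (pvD trans al bl (i - 2) (j - 2) + 1)
       else v) := by
  obtain ⟨i', rfl⟩ : ∃ i', i = i' + 1 := ⟨i - 1, by omega⟩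
  obtain ⟨j', rfl⟩ : ∃ j', j = j' + 1 := ⟨j - 1, by omega⟩
  have h2 : i' + 1 - 2 = i' - 1 := by omega
  have h3 : j' + 1 - 2 = j' - 1 := by omega
  simp only [pvD, Nat.add_sub_cancel, h2, h3]
  refine if_congr ?_ rfl rfl
  constructor
  · rintro ⟨ht, hi0, hj0, ha, hb⟩; exact ⟨ht, by omega, by omega, ha, hb⟩
  · rintro ⟨ht, hi0, hj0, ha, hb⟩; exact ⟨ht, by omega, by omega, ha, hb⟩

-- shape of A's dp matrix
def pvShp (la lb : Nat) (dp : List (List Int)) : Prop :=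
  dp.length = la + 1 ∧ ∀ k, k ≤ la → (dp.getD k []).length = lb + 1

lemma getD_set_self (l : List Int) (j : Nat) (v : Int) (h : j < l.length) :
    (l.set j v).getD j 0 = v := by
  simp [List.getD, List.getElem?_set, h]

lemma getD_set_ne (l : List Int) (j j' : Nat) (v : Int) (h : j' ≠ j) :
    (l.set j v).getD j' 0 = l.getD j' 0 := by
  simp [List.getD, List.getElem?_set, Ne.symm h]

lemma pvMSet_getD_self (dp : List (List Int)) (i j : Nat) (v : Int) (h : i < dp.length) :
    (pvMSet dp i j v).getD i [] = (dp.getD i []).set j v := by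
  simp [pvMSet, List.getD, List.getElem?_set_self h]

lemma pvMSet_getD_ne (dp : List (List Int)) (i j k : Nat) (v : Int) (h : k ≠ i) :
    (pvMSet dp i j v).getD k [] = dp.getD k [] := by
  simp [pvMSet, List.getD, List.getElem?_set, Ne.symm h]

lemma pvShp_mset (la lb : Nat) (dp : List (List Int)) (i j : Nat) (v : Int)
    (h : pvShp la lb dp) : pvShp la lb (pvMSet dp i j v) := by
  obtain ⟨h1, h2⟩ := h
  constructor
  · simp [pvMSet, h1]
  · intro k hk
    by_cases hik : k = i
    · subst hik
      by_cases hlt : k < dp.length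
      · rw [pvMSet_getD_self dp k j v hlt, List.length_set]
        exact h2 k hk
      · rw [pvMSet, List.set_eq_of_length_le (by omega)]
        exact h2 k hk
    · rw [pvMSet_getD_ne dp i j k v hik]
      exact h2 k hk

lemma pvMGet_mset_self (la lb : Nat) (dp : List (List Int)) (i j : Nat) (v : Int)
    (h : pvShp la lb dp) (hi : i ≤ la) (hj : j ≤ lb) :
    pvMGet (pvMSet dp i j v) i j = v := by
  obtain ⟨h1, h2⟩ := h
  have hlt : i < dp.length := by omega
  rw [pvMGet, pvMSet_getD_self dp i j v hlt, getD_set_self]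
  rw [h2 i hi]; omega

lemma pvMGet_mset_ne (dp : List (List Int)) (i j i' j' : Nat) (v : Int)
    (h : i' ≠ i ∨ j' ≠ j) : pvMGet (pvMSet dp i j v) i' j' = pvMGet dp i' j' := by
  by_cases hik : i' = i
  · subst hik
    have hj : j' ≠ j := by tauto
    by_cases hlt : i' < dp.length
    · rw [pvMGet, pvMSet_getD_self dp i' j v hlt, getD_set_ne _ _ _ _ hj]; rfl
    · rw [pvMGet, pvMSet, List.set_eq_of_length_le (by omega)]; rfl
  · rw [pvMGet, pvMSet_getD_ne dp i j i' v hik]; rfl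

-- A's per-cell update, parameterised by the transposition flag
def pvStepA (trans : Bool) (al bl : List Char) (i : Nat) (dp : List (List Int)) (j : Nat) :
    List (List Int) :=
  let cost : Int := if al.getD (i - 1) ' ' = bl.getD (j - 1) ' ' then 0 else 1
  let v := min (min (pvMGet dp (i - 1) j + 1) (pvMGet dp i (j - 1) + 1))
               (pvMGet dp (i - 1) (j - 1) + cost)
  let dp' := pvMSet dp i j v
  if trans = true ∧ 1 < i ∧ 1 < j ∧ al.getD (i - 1) ' ' = bl.getD (j - 2) ' ' ∧
      al.getD (i - 2) ' ' = bl.getD (j - 1) ' ' then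
    pvMSet dp' i j (min (pvMGet dp' i j) (pvMGet dp' (i - 2) (j - 2) + 1))
  else dp'

-- A's loop invariant: base row/column hold 0..; cells strictly before (i, j) in scan order hold pvD
def pvInvA (trans : Bool) (al bl : List Char) (i j : Nat) (dp : List (List Int)) : Prop :=
  pvShp al.length bl.length dp ∧
  (∀ i', i' ≤ al.length → pvMGet dp i' 0 = (i' : Int)) ∧
  (∀ j', j' ≤ bl.length → pvMGet dp 0 j' = (j' : Int)) ∧
  (∀ i' j', 1 ≤ i' → 1 ≤ j' → i' ≤ al.length → j' ≤ bl.length →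
    (i' < i ∨ (i' = i ∧ j' < j)) → pvMGet dp i' j' = pvD trans al bl i' j')

lemma pvInvA_read (trans : Bool) (al bl : List Char) (i j : Nat) (dp : List (List Int))
    (h : pvInvA trans al bl i j dp) (i' j' : Nat) (hi : i' ≤ al.length) (hj : j' ≤ bl.length)
    (hlt : i' < i ∨ (i' = i ∧ j' < j)) : pvMGet dp i' j' = pvD trans al bl i' j' := by
  obtain ⟨_, hcol, hrow, hreg⟩ := h
  rcases Nat.eq_zero_or_pos i' with hz | hp
  · subst hz; rw [hrow j' hj, pvD_zero_left]
  rcases Nat.eq_zero_or_pos j' with hz | hp'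
  · subst hz; rw [hcol i' hi, pvD_zero_right]
  exact hreg i' j' hp hp' hi hj hlt

lemma pvMSet_collapse (la lb : Nat) (dp : List (List Int)) (i j : Nat) (v w : Int)
    (h : pvShp la lb dp) (hi : i ≤ la) :
    pvMSet (pvMSet dp i j v) i j w = pvMSet dp i j w := by
  obtain ⟨h1, _⟩ := h
  have hlt : i < dp.length := by omega
  rw [pvMSet, pvMSet_getD_self dp i j v hlt, List.set_set, pvMSet, pvMSet]
  rw [List.set_set]

lemma pvStepA_inv (trans : Bool) (al bl : List Char) (i j : Nat) (dp : List (List Int))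
    (hi : 1 ≤ i) (hila : i ≤ al.length) (hj : 1 ≤ j) (hjlb : j ≤ bl.length)
    (h : pvInvA trans al bl i j dp) :
    pvInvA trans al bl i (j + 1) (pvStepA trans al bl i dp j) := by
  have hshp := h.1
  have r1 : pvMGet dp (i - 1) j = pvD trans al bl (i - 1) j :=
    pvInvA_read trans al bl i j dp h (i - 1) j (by omega) hjlb (Or.inl (by omega))
  have r2 : pvMGet dp i (j - 1) = pvD trans al bl i (j - 1) :=
    pvInvA_read trans al bl i j dp h i (j - 1) hila (by omega) (Or.inr ⟨rfl, by omega⟩)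
  have r3 : pvMGet dp (i - 1) (j - 1) = pvD trans al bl (i - 1) (j - 1) :=
    pvInvA_read trans al bl i j dp h (i - 1) (j - 1) (by omega) (by omega) (Or.inl (by omega))
  have r4 : pvMGet dp (i - 2) (j - 2) = pvD trans al bl (i - 2) (j - 2) :=
    pvInvA_read trans al bl i j dp h (i - 2) (j - 2) (by omega) (by omega) (Or.inl (by omega))
  -- the step writes exactly pvD i j at (i, j)
  have hstep : pvStepA trans al bl i dp j = pvMSet dp i j (pvD trans al bl i j) := by
    rw [pvStepA]
    rw [pvD_pos trans al bl i j hi hj]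
    simp only [r1, r2, r3]
    set v := min (min (pvD trans al bl (i - 1) j + 1) (pvD trans al bl i (j - 1) + 1))
      (pvD trans al bl (i - 1) (j - 1) +
        if al.getD (i - 1) ' ' = bl.getD (j - 1) ' ' then 0 else 1) with hv
    split_ifs with hg
    · have hself : pvMGet (pvMSet dp i j v) i j = v :=
        pvMGet_mset_self al.length bl.length dp i j v hshp hila hjlb
      have hne : pvMGet (pvMSet dp i j v) (i - 2) (j - 2) = pvMGet dp (i - 2) (j - 2) :=
        pvMGet_mset_ne dp i j (i - 2) (j - 2) v (Or.inl (by omega))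
      rw [hself, hne, r4, pvMSet_collapse al.length bl.length dp i j v _ hshp hila]
    · rfl
  rw [hstep]
  obtain ⟨hshp', hcol, hrow, hreg⟩ := h
  refine ⟨pvShp_mset _ _ _ _ _ _ hshp', ?_, ?_, ?_⟩
  · intro i' hi'
    rw [pvMGet_mset_ne dp i j i' 0 _ (Or.inr (by omega))]
    exact hcol i' hi'
  · intro j' hj'
    rw [pvMGet_mset_ne dp i j 0 j' _ (Or.inl (by omega))]
    exact hrow j' hj'
  · intro i' j' hi1 hj1 hia hjb hlt
    by_cases hij : i' = i ∧ j' = j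
    · obtain ⟨rfl, rfl⟩ := hij
      exact pvMGet_mset_self al.length bl.length dp i' j' _ hshp' hia hjb
    · have hne : i' ≠ i ∨ j' ≠ j := by tauto
      rw [pvMGet_mset_ne dp i j i' j' _ hne]
      exact hreg i' j' hi1 hj1 hia hjb (by omega)

lemma pvInnerA (trans : Bool) (al bl : List Char) (i : Nat)
    (hi : 1 ≤ i) (hila : i ≤ al.length) :
    ∀ (k s : Nat) (dp : List (List Int)), 1 ≤ s → s + k = bl.length + 1 →
      pvInvA trans al bl i s dp →
      pvInvA trans al bl i (s + k) ((List.range' s k).foldl (pvStepA trans al bl i) dp) := by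
  intro k
  induction k with
  | zero => intro s dp _ _ h; simpa using h
  | succ n ih =>
    intro s dp hs hsum h
    rw [List.range'_succ, List.foldl_cons]
    have hstep := pvStepA_inv trans al bl i s dp hi hila hs (by omega) h
    have := ih (s + 1) (pvStepA trans al bl i dp s) (by omega) (by omega) hstep
    have harr : s + 1 + n = s + (n + 1) := by omega
    rwa [harr] at this

lemma pvInvA_advance (trans : Bool) (al bl : List Char) (i : Nat) (dp : List (List Int))
    (h : pvInvA trans al bl i (bl.length + 1) dp) : pvInvA trans al bl (i + 1) 1 dp := by
  obtain ⟨h1, h2, h3, h4⟩ := h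
  refine ⟨h1, h2, h3, ?_⟩
  intro i' j' hi' hj' hia hjb hlt
  exact h4 i' j' hi' hj' hia hjb (by omega)

lemma pvOuterA (trans : Bool) (al bl : List Char) :
    ∀ (k s : Nat) (dp : List (List Int)), 1 ≤ s → s + k = al.length + 1 →
      pvInvA trans al bl s 1 dp →
      pvInvA trans al bl (s + k) 1
        ((List.range' s k).foldl
          (fun dp i => (List.range' 1 bl.length).foldl (pvStepA trans al bl i) dp) dp) := by
  intro k
  induction k with
  | zero => intro s dp _ _ h; simpa using h
  | succ n ih =>
    intro s dp hs hsum h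
    rw [List.range'_succ, List.foldl_cons]
    have hinner := pvInnerA trans al bl s hs (by omega) bl.length 1 dp (le_refl 1)
      (by omega) h
    rw [Nat.add_comm 1 bl.length] at hinner
    have := ih (s + 1) _ (by omega) (by omega) (pvInvA_advance trans al bl s _ hinner)
    have harr : s + 1 + n = s + (n + 1) := by omega
    rwa [harr] at this

-- the two initialisation loops
lemma pvShp0 (la lb : Nat) :
    pvShp la lb (List.replicate (la + 1) (List.replicate (lb + 1) (0 : Int))) := by
  constructor
  · simp
  · intro k hk
    simp [List.getD, List.getElem?_replicate, Nat.lt_succ_of_le hk]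

lemma pvColFold (la lb : Nat) (l : List Nat) (hl : ∀ x ∈ l, x ≤ la) :
    ∀ dp : List (List Int), pvShp la lb dp →
      pvShp la lb (l.foldl (fun dp i => pvMSet dp i 0 (i : Int)) dp) ∧
      ∀ i' j', pvMGet (l.foldl (fun dp i => pvMSet dp i 0 (i : Int)) dp) i' j' =
        if i' ∈ l ∧ j' = 0 then (i' : Int) else pvMGet dp i' j' := by
  induction l with
  | nil => intro dp h; exact ⟨h, fun i' j' => by simp⟩
  | cons x xs ih =>
    intro dp h
    have hx : x ≤ la := hl x List.mem_cons_self
    have hxs : ∀ y ∈ xs, y ≤ la := fun y hy => hl y (List.mem_cons_of_mem x hy)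
    have h1 : pvShp la lb (pvMSet dp x 0 (x : Int)) := pvShp_mset la lb dp x 0 _ h
    obtain ⟨hshp', hval⟩ := ih hxs (pvMSet dp x 0 (x : Int))  h1
    refine ⟨by simpa using hshp', ?_⟩
    intro i' j'
    rw [List.foldl_cons, hval i' j']
    by_cases hmem : i' ∈ xs ∧ j' = 0
    · simp [hmem, List.mem_cons, hmem.1, hmem.2]
    · rw [if_neg hmem]
      by_cases hx' : i' = x ∧ j' = 0
      · obtain ⟨rfl, rfl⟩ := hx'
        rw [pvMGet_mset_self la lb dp i' 0 _ h hx (by omega)]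
        simp [List.mem_cons]
      · have hne : i' ≠ x ∨ j' ≠ 0 := by tauto
        rw [pvMGet_mset_ne dp x 0 i' j' _ hne]
        rw [if_neg ?_]
        rintro ⟨hmem', rfl⟩
        rcases List.mem_cons.mp hmem' with rfl | hmem''
        · exact (by tauto : ¬(i' = i' ∧ (0:Nat) = 0)) ⟨rfl, rfl⟩
        · exact hmem ⟨hmem'', rfl⟩

lemma pvRowFold (la lb : Nat) (l : List Nat) (hl : ∀ x ∈ l, x ≤ lb) :
    ∀ dp : List (List Int), pvShp la lb dp →
      pvShp la lb (l.foldl (fun dp j => pvMSet dp 0 j (j : Int)) dp) ∧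
      ∀ i' j', pvMGet (l.foldl (fun dp j => pvMSet dp 0 j (j : Int)) dp) i' j' =
        if i' = 0 ∧ j' ∈ l then (j' : Int) else pvMGet dp i' j' := by
  induction l with
  | nil => intro dp h; exact ⟨h, fun i' j' => by simp⟩
  | cons x xs ih =>
    intro dp h
    have hx : x ≤ lb := hl x List.mem_cons_self
    have hxs : ∀ y ∈ xs, y ≤ lb := fun y hy => hl y (List.mem_cons_of_mem x hy)
    have h1 : pvShp la lb (pvMSet dp 0 x (x : Int)) := pvShp_mset la lb dp 0 x _ h
    obtain ⟨hshp', hval⟩ := ih hxs (pvMSet dp 0 x (x : Int)) h1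
    refine ⟨by simpa using hshp', ?_⟩
    intro i' j'
    rw [List.foldl_cons, hval i' j']
    by_cases hmem : i' = 0 ∧ j' ∈ xs
    · simp [hmem, List.mem_cons, hmem.1, hmem.2]
    · rw [if_neg hmem]
      by_cases hx' : i' = 0 ∧ j' = x
      · obtain ⟨rfl, rfl⟩ := hx'
        rw [pvMGet_mset_self la lb dp 0 j' _ h (by omega) hx]
        simp [List.mem_cons]
      · have hne : i' ≠ 0 ∨ j' ≠ x := by tauto
        rw [pvMGet_mset_ne dp 0 x i' j' _ hne]
        rw [if_neg ?_]
        rintro ⟨rfl, hmem'⟩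
        rcases List.mem_cons.mp hmem' with rfl | hmem''
        · exact (by tauto : ¬((0:Nat) = 0 ∧ j' = j')) ⟨rfl, rfl⟩
        · exact hmem ⟨rfl, hmem''⟩

lemma pvInitA (trans : Bool) (al bl : List Char) :
    pvInvA trans al bl 1 1
      ((List.range (bl.length + 1)).foldl (fun dp j => pvMSet dp 0 j (j : Int))
        ((List.range (al.length + 1)).foldl (fun dp i => pvMSet dp i 0 (i : Int))
          (List.replicate (al.length + 1) (List.replicate (bl.length + 1) (0 : Int))))) := by
  obtain ⟨hshp1, hval1⟩ := pvColFold al.length bl.length (List.range (al.length + 1))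
    (fun x hx => by simpa using Nat.lt_succ_iff.mp (List.mem_range.mp hx))
    (List.replicate (al.length + 1) (List.replicate (bl.length + 1) (0 : Int)))
    (pvShp0 al.length bl.length)
  obtain ⟨hshp2, hval2⟩ := pvRowFold al.length bl.length (List.range (bl.length + 1))
    (fun x hx => by simpa using Nat.lt_succ_iff.mp (List.mem_range.mp hx))
    _ hshp1
  refine ⟨hshp2, ?_, ?_, ?_⟩
  · intro i' hi'
    rw [hval2 i' 0]
    by_cases h0 : i' = 0
    · simp [h0]
    · rw [if_neg (by tauto), hval1 i' 0,
        if_pos ⟨List.mem_range.mpr (by omega), rfl⟩]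
  · intro j' hj'
    rw [hval2 0 j', if_pos ⟨rfl, List.mem_range.mpr (by omega)⟩]
  · intro i' j' hi1 hj1 _ _ hlt
    omega

lemma pvMatrixA (trans : Bool) (al bl : List Char) :
    pvMGet ((List.range' 1 al.length).foldl
        (fun dp i => (List.range' 1 bl.length).foldl (pvStepA trans al bl i) dp)
        ((List.range (bl.length + 1)).foldl (fun dp j => pvMSet dp 0 j (j : Int))
          ((List.range (al.length + 1)).foldl (fun dp i => pvMSet dp i 0 (i : Int))
            (List.replicate (al.length + 1) (List.replicate (bl.length + 1) (0 : Int))))))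
      al.length bl.length = pvD trans al bl al.length bl.length := by
  have h := pvOuterA trans al bl al.length 1 _ (le_refl 1) (by omega) (pvInitA trans al bl)
  exact pvInvA_read trans al bl (1 + al.length) 1 _ h al.length bl.length (le_refl _)
    (le_refl _) (Or.inl (by omega))

lemma lev_eq_pvD (a b : String) :
    levenshtein_distance a b = pvD false a.toList b.toList a.toList.length b.toList.length := by
  unfold levenshtein_distance
  by_cases h1 : a.toList = []
  · simp [h1, pvD_zero_left]
  by_cases h2 : b.toList = []
  · simp [h1, h2, pvD_zero_right]
  simp only [h1, h2, if_false]
  have hlam : (fun (dp : List (List Int)) (i : Nat) =>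
      List.foldl (fun dp j => pvMSet dp i j
        (min (min (pvMGet dp (i - 1) j + 1) (pvMGet dp i (j - 1) + 1))
          (pvMGet dp (i - 1) (j - 1) +
            if a.toList.getD (i - 1) ' ' = b.toList.getD (j - 1) ' ' then 0 else 1)))
        dp (List.range' 1 b.toList.length)) =
      (fun (dp : List (List Int)) (i : Nat) =>
        List.foldl (pvStepA false a.toList b.toList i) dp (List.range' 1 b.toList.length)) := by
    funext dp i
    congr 1
  rw [hlam]
  exact pvMatrixA false a.toList b.toList

lemma dam_eq_pvD (a b : String) :
    damerau_levenshtein_distance a b =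
      pvD true a.toList b.toList a.toList.length b.toList.length := by
  unfold damerau_levenshtein_distance
  by_cases h1 : a.toList = []
  · simp [h1, pvD_zero_left]
  by_cases h2 : b.toList = []
  · simp [h1, h2, pvD_zero_right]
  simp only [h1, h2, if_false]
  have hlam : (fun (dp : List (List Int)) (i : Nat) =>
      List.foldl (fun dp j =>
        if 1 < i ∧ 1 < j ∧ a.toList.getD (i - 1) ' ' = b.toList.getD (j - 2) ' ' ∧
            a.toList.getD (i - 2) ' ' = b.toList.getD (j - 1) ' ' then
          pvMSet (pvMSet dp i j
            (min (min (pvMGet dp (i - 1) j + 1) (pvMGet dp i (j - 1) + 1))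
              (pvMGet dp (i - 1) (j - 1) +
                if a.toList.getD (i - 1) ' ' = b.toList.getD (j - 1) ' ' then 0 else 1))) i j
            (min (pvMGet (pvMSet dp i j
              (min (min (pvMGet dp (i - 1) j + 1) (pvMGet dp i (j - 1) + 1))
                (pvMGet dp (i - 1) (j - 1) +
                  if a.toList.getD (i - 1) ' ' = b.toList.getD (j - 1) ' ' then 0 else 1))) i j)
              (pvMGet (pvMSet dp i j
                (min (min (pvMGet dp (i - 1) j + 1) (pvMGet dp i (j - 1) + 1))
                  (pvMGet dp (i - 1) (j - 1) +
                    if a.toList.getD (i - 1) ' ' = b.toList.getD (j - 1) ' ' then 0 else 1)))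
                (i - 2) (j - 2) + 1))
        else pvMSet dp i j
          (min (min (pvMGet dp (i - 1) j + 1) (pvMGet dp i (j - 1) + 1))
            (pvMGet dp (i - 1) (j - 1) +
              if a.toList.getD (i - 1) ' ' = b.toList.getD (j - 1) ' ' then 0 else 1)))
        dp (List.range' 1 b.toList.length)) =
      (fun (dp : List (List Int)) (i : Nat) =>
        List.foldl (pvStepA true a.toList b.toList i) dp (List.range' 1 b.toList.length)) := by
    funext dp i
    congr 1
    funext dp' j
    simp [pvStepA]
  rw [hlam]
  exact pvMatrixA true a.toList b.toList

-- ===== B side: the memoized recursion computes pvD =====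

-- every value stored in the memo is the recurrence's value at its key
def pvGood (trans : Bool) (al bl : List Char) (m : PySem.Dict (Nat × Nat) Int) : Prop :=
  ∀ i j v, m.get? (i, j) = some v → v = pvD trans al bl i j

lemma pvGood_insert (trans : Bool) (al bl : List Char) (m : PySem.Dict (Nat × Nat) Int)
    (i j : Nat) (v : Int) (hm : pvGood trans al bl m) (hv : v = pvD trans al bl i j) :
    pvGood trans al bl (m.insert (i, j) v) := by
  intro i' j' w hw
  rw [PySem.Dict.get?_insert] at hw
  split at hw
  · rename_i heq
    obtain ⟨rfl, rfl⟩ := Prod.mk.injEq .. ▸ heq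
    cases hw; exact hv
  · exact hm i' j' w hw

lemma pvMemoD_spec (trans : Bool) (al bl : List Char) :
    ∀ (n i j : Nat) (m : PySem.Dict (Nat × Nat) Int), i + j ≤ n → pvGood trans al bl m →
      (pvMemoD trans al bl i j m).1 = pvD trans al bl i j ∧
      pvGood trans al bl (pvMemoD trans al bl i j m).2 := by
  intro n
  induction n with
  | zero =>
    intro i j m hle hg
    obtain rfl : i = 0 := by omega
    obtain rfl : j = 0 := by omega
    simp [pvMemoD, pvD_zero_left, hg]
  | succ n ih =>
    intro i j m hle hg
    match i, j with
    | 0, j => simp [pvMemoD, pvD_zero_left, hg]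
    | i + 1, 0 => simpa [pvMemoD, pvD_zero_right] using hg
    | i + 1, j + 1 =>
      rw [pvMemoD]
      cases hget : m.get? (i + 1, j + 1) with
      | some v =>
        exact ⟨hg (i + 1) (j + 1) v hget, hg⟩
      | none =>
        simp only []
        obtain ⟨e1, g1⟩ := ih i (j + 1) m (by omega) hg
        obtain ⟨e2, g2⟩ := ih (i + 1) j _ (by omega) g1
        obtain ⟨e3, g3⟩ := ih i j _ (by omega) g2
        -- the computed value is pvD (i+1) (j+1)
        have hval : min (min ((pvMemoD trans al bl i (j + 1) m).1 + 1)
              ((pvMemoD trans al bl (i + 1) j (pvMemoD trans al bl i (j + 1) m).2).1 + 1))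
              ((pvMemoD trans al bl i j
                (pvMemoD trans al bl (i + 1) j (pvMemoD trans al bl i (j + 1) m).2).2).1 +
                if al.getD i ' ' ≠ bl.getD j ' ' then 1 else 0) =
            min (min (pvD trans al bl i (j + 1) + 1) (pvD trans al bl (i + 1) j + 1))
              (pvD trans al bl i j +
                if al.getD i ' ' = bl.getD j ' ' then 0 else 1) := by
          rw [e1, e2, e3]
          congr 1
          congr 1
          split_ifs <;> simp_all
        by_cases hguard : trans = true ∧ 0 < i ∧ 0 < j ∧ al.getD i ' ' = bl.getD (j - 1) ' ' ∧
            al.getD (i - 1) ' ' = bl.getD j ' '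
        · rw [if_pos hguard]
          obtain ⟨e4, g4⟩ := ih (i - 1) (j - 1) _ (by omega) g3
          have hfinal : min (min (min ((pvMemoD trans al bl i (j + 1) m).1 + 1)
                ((pvMemoD trans al bl (i + 1) j (pvMemoD trans al bl i (j + 1) m).2).1 + 1))
                ((pvMemoD trans al bl i j
                  (pvMemoD trans al bl (i + 1) j (pvMemoD trans al bl i (j + 1) m).2).2).1 +
                  if al.getD i ' ' ≠ bl.getD j ' ' then 1 else 0))
              ((pvMemoD trans al bl (i - 1) (j - 1)
                (pvMemoD trans al bl i j
                  (pvMemoD trans al bl (i + 1) j (pvMemoD trans al bl i (j + 1) m).2).2).2).1 + 1) =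
              pvD trans al bl (i + 1) (j + 1) := by
            rw [hval, e4]
            rw [pvD_pos trans al bl (i + 1) (j + 1) (by omega) (by omega)]
            have a1 : i + 1 - 1 = i := by omega
            have a2 : j + 1 - 1 = j := by omega
            have a3 : i + 1 - 2 = i - 1 := by omega
            have a4 : j + 1 - 2 = j - 1 := by omega
            simp only [a1, a2, a3, a4]
            by_cases hgg : trans = true ∧ 1 < i + 1 ∧ 1 < j + 1 ∧
                al.getD i ' ' = bl.getD (j - 1) ' ' ∧ al.getD (i - 1) ' ' = bl.getD j ' '
            · rw [if_pos hgg]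
            · exact absurd ⟨hguard.1, by omega, by omega, hguard.2.2.2.1,
                hguard.2.2.2.2⟩ hgg
          exact ⟨hfinal, pvGood_insert trans al bl _ (i + 1) (j + 1) _ g4 hfinal⟩
        · rw [if_neg hguard]
          have hfinal : min (min ((pvMemoD trans al bl i (j + 1) m).1 + 1)
                ((pvMemoD trans al bl (i + 1) j (pvMemoD trans al bl i (j + 1) m).2).1 + 1))
                ((pvMemoD trans al bl i j
                  (pvMemoD trans al bl (i + 1) j (pvMemoD trans al bl i (j + 1) m).2).2).1 +
                  if al.getD i ' ' ≠ bl.getD j ' ' then 1 else 0) =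
              pvD trans al bl (i + 1) (j + 1) := by
            rw [hval]
            rw [pvD_pos trans al bl (i + 1) (j + 1) (by omega) (by omega)]
            have a1 : i + 1 - 1 = i := by omega
            have a2 : j + 1 - 1 = j := by omega
            have a3 : i + 1 - 2 = i - 1 := by omega
            have a4 : j + 1 - 2 = j - 1 := by omega
            simp only [a1, a2, a3, a4]
            by_cases hgg : trans = true ∧ 1 < i + 1 ∧ 1 < j + 1 ∧
                al.getD i ' ' = bl.getD (j - 1) ' ' ∧ al.getD (i - 1) ' ' = bl.getD j ' '
            · exact absurd ⟨hgg.1, by omega, by omega, hgg.2.2.2.1, hgg.2.2.2.2⟩ hguard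
            · rw [if_neg hgg]
          exact ⟨hfinal, pvGood_insert trans al bl _ (i + 1) (j + 1) _ g3 hfinal⟩

lemma pvDistB_eq_pvD (word t : String) (trans : Bool) :
    pvDistB word t trans =
      pvD trans word.toList t.toList word.toList.length t.toList.length := by
  exact (pvMemoD_spec trans word.toList t.toList
    (word.toList.length + t.toList.length) word.toList.length t.toList.length
    PySem.Dict.empty le_rfl (by intro i j v h; simp [PySem.Dict.get?_empty] at h)).1

-- ===== B side: bucket grouping is the stable sort by distance =====

-- stability of PySem's insertion step: inserting x does not change any key-class except
-- by appending x to its own class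
lemma pvInsFilter {α : Type} (key : α → Int) (x : α) (k : Int) :
    ∀ ys : List α, ys.Pairwise (fun a b => key a ≤ key b) →
      (PySem.List.insertBy (fun a b => decide (key a < key b)) x ys).filter
          (fun y => key y == k) =
        (ys ++ [x]).filter (fun y => key y == k) := by
  intro ys
  induction ys with
  | nil => simp [PySem.List.insertBy]
  | cons y ys ih =>
    intro hp
    rw [PySem.List.insertBy]
    by_cases hb : key x < key y
    · rw [if_pos (by simpa using hb)]
      have hall : ∀ w ∈ y :: ys, key x < key w := by
        intro w hw
        rcases List.mem_cons.mp hw with rfl | hw'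
        · exact hb
        · exact lt_of_lt_of_le hb (List.rel_of_pairwise_cons hp hw')
      by_cases hk : key x = k
      · have hnil : (y :: ys).filter (fun w => key w == k) = [] := by
          rw [List.filter_eq_nil_iff]
          intro w hw
          have := hall w hw
          simp only [beq_iff_eq]
          omega
        rw [List.filter_cons_of_pos (by simpa using hk), List.filter_append, hnil,
          List.nil_append]
        simp [hk]
      · rw [List.filter_cons_of_neg (by simpa using hk), List.filter_append]
        simp [hk]
    · rw [if_neg (by simpa using hb)]
      rw [List.cons_append]
      simp only [List.filter_cons]
      rw [ih (List.Pairwise.of_cons hp)]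

-- the filter of PySem's stable sort at each key equals the filter of the input
lemma pvSortedFilter {α : Type} (key : α → Int) (xs : List α) (k : Int) :
    (PySem.List.sorted xs key).filter (fun y => key y == k) =
      xs.filter (fun y => key y == k) := by
  induction xs using List.reverseRecOn with
  | nil => simp [PySem.List.sorted_eq_foldl_insertBy]
  | append_singleton xs x ih =>
    rw [PySem.List.sorted_eq_foldl_insertBy, List.foldl_append, List.foldl_cons,
      List.foldl_nil, ← PySem.List.sorted_eq_foldl_insertBy,
      pvInsFilter key x k _ (PySem.List.sorted_pairwise xs key),
      List.filter_append, ih, ← List.filter_append]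

-- two key-sorted lists with identical key-classes are equal
lemma pvUniq {α : Type} (key : α → Int) :
    ∀ (ys zs : List α), ys.Pairwise (fun a b => key a ≤ key b) →
      zs.Pairwise (fun a b => key a ≤ key b) →
      (∀ k, ys.filter (fun y => key y == k) = zs.filter (fun y => key y == k)) →
      ys = zs := by
  intro ys
  induction ys with
  | nil =>
    intro zs _ _ hf
    cases zs with
    | nil => rfl
    | cons z zs' =>
      have h := hf (key z)
      rw [List.filter_nil, List.filter_cons_of_pos (by simp)] at h
      exact absurd h (by simp)
  | cons y ys' ih =>
    intro zs hy hz hf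
    cases zs with
    | nil =>
      have h := hf (key y)
      rw [List.filter_nil, List.filter_cons_of_pos (by simp)] at h
      exact absurd h (by simp)
    | cons z zs' =>
      have le1 : key y ≤ key z := by
        have h := hf (key z)
        rw [List.filter_cons_of_pos (l := zs') (by simp)] at h
        have hzmem : z ∈ (y :: ys').filter (fun w => key w == key z) := by
          rw [h]; exact List.mem_cons_self
        have := List.mem_filter.mp hzmem
        rcases List.mem_cons.mp this.1 with rfl | hmem
        · exact le_refl _
        · exact List.rel_of_pairwise_cons hy hmem
      have le2 : key z ≤ key y := by
        have h := hf (key y)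
        rw [List.filter_cons_of_pos (l := ys') (by simp)] at h
        have hymem : y ∈ (z :: zs').filter (fun w => key w == key y) := by
          rw [← h]; exact List.mem_cons_self
        have := List.mem_filter.mp hymem
        rcases List.mem_cons.mp this.1 with rfl | hmem
        · exact le_refl _
        · exact List.rel_of_pairwise_cons hz hmem
      have hyz : key y = key z := le_antisymm le1 le2
      have h := hf (key y)
      rw [List.filter_cons_of_pos (l := ys') (by simp),
        List.filter_cons_of_pos (l := zs') (by simp [hyz])] at h
      obtain ⟨rfl, htail⟩ := List.cons.injEq .. ▸ h
      congr 1
      apply ih zs' (List.Pairwise.of_cons hy) (List.Pairwise.of_cons hz)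
      intro k
      by_cases hk : key y = k
      · subst hk; exact htail
      · have h2 := hf k
        rw [List.filter_cons_of_neg (by simpa using hk),
          List.filter_cons_of_neg (by simpa [← hyz] using hk)] at h2
        exact h2

-- the bucket concatenation is key-sorted
lemma pvFlatPairwise (pairs : List (String × Int)) :
    ∀ ks : List Int, ks.Pairwise (· < ·) →
      (ks.flatMap (fun k => pairs.filter (fun p => p.2 == k))).Pairwise
        (fun a b => a.2 ≤ b.2) := by
  intro ks
  induction ks with
  | nil => simp
  | cons a ks ih =>
    intro h
    rw [List.flatMap_cons, List.pairwise_append]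
    refine ⟨?_, ih (List.Pairwise.of_cons h), ?_⟩
    · refine List.pairwise_iff_forall_sublist.mpr ?_
      intro x y hsub
      have hx : x ∈ pairs.filter (fun p => p.2 == a) := hsub.subset (by simp)
      have hy : y ∈ pairs.filter (fun p => p.2 == a) := hsub.subset (by simp)
      have ex : x.2 = a := by simpa using (List.mem_filter.mp hx).2
      have ey : y.2 = a := by simpa using (List.mem_filter.mp hy).2
      omega
    · intro x hx y hy
      have ex : x.2 = a := by simpa using (List.mem_filter.mp hx).2
      obtain ⟨k', hk', hy'⟩ := List.mem_flatMap.mp hy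
      have ey : y.2 = k' := by simpa using (List.mem_filter.mp hy').2
      have := List.rel_of_pairwise_cons h hk'
      omega

-- the filter of the bucket concatenation at each key
lemma pvFlatFilter (pairs : List (String × Int)) (k : Int) :
    ∀ ks : List Int, ks.Nodup →
      (ks.flatMap (fun k' => pairs.filter (fun p => p.2 == k'))).filter
          (fun p => p.2 == k) =
        if k ∈ ks then pairs.filter (fun p => p.2 == k) else [] := by
  intro ks
  induction ks with
  | nil => simp
  | cons a ks ih =>
    intro hnd
    rw [List.flatMap_cons, List.filter_append, List.filter_filter, ih hnd.of_cons]
    by_cases hak : a = k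
    · subst hak
      have h1 : pairs.filter (fun p => (p.2 == a) && (p.2 == a)) =
          pairs.filter (fun p => p.2 == a) := by
        apply List.filter_congr; intro p _; simp
      have h2 : a ∉ ks := by simpa using (List.nodup_cons.mp hnd).1
      rw [h1, if_neg h2, if_pos List.mem_cons_self, List.append_nil]
    · have h1 : pairs.filter (fun p => (p.2 == k) && (p.2 == a)) = [] := by
        rw [List.filter_eq_nil_iff]
        intro p _
        simp only [Bool.and_eq_true, beq_iff_eq]
        rintro ⟨rfl, h⟩
        exact hak h.symm
      rw [h1, List.nil_append]
      by_cases hk : k ∈ ks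
      · rw [if_pos hk, if_pos (List.mem_cons_of_mem _ hk)]
      · rw [if_neg hk, if_neg (by simp [hak, hk, Ne.symm hak])]

-- the whole driver identity: bucket grouping = stable sort by the distance component
lemma pvBuckets (pairs : List (String × Int)) :
    PySem.List.sorted pairs (fun x => x.2) =
      (PySem.List.sorted (PySem.Set.ofList (pairs.map (fun p => p.2))) (fun x => x)).foldl
        (fun out k =>
          pairs.foldl (fun out p => if p.2 == k then out ++ [p] else out) out) [] := by
  have hfold : (PySem.List.sorted (PySem.Set.ofList (pairs.map (fun p => p.2)))
        (fun x => x)).foldl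
        (fun out k =>
          pairs.foldl (fun out p => if p.2 == k then out ++ [p] else out) out) [] =
      (PySem.List.sorted (PySem.Set.ofList (pairs.map (fun p => p.2)))
        (fun x => x)).flatMap (fun k => pairs.filter (fun p => p.2 == k)) := by
    have h1 : (fun (out : List (String × Int)) k =>
        pairs.foldl (fun out p => if p.2 == k then out ++ [p] else out) out) =
        (fun out k => out ++ pairs.filter (fun p => p.2 == k)) := by
      funext out k
      have := PySem.List.foldl_append_if (fun (p : String × Int) => p.2 == k)
        (fun p => p) pairs out
      simpa using this
    rw [h1, PySem.List.foldl_append_eq_flatMap, List.nil_append]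
  rw [hfold]
  have hks_lt : (PySem.List.sorted (PySem.Set.ofList (pairs.map (fun p => p.2)))
      (fun x => x)).Pairwise (· < ·) := PySem.List.sorted_ofList_pairwise_lt _
  have hnd := hks_lt.imp (fun h => ne_of_lt h)
  have hmem : ∀ k, k ∈ PySem.List.sorted (PySem.Set.ofList (pairs.map (fun p => p.2)))
      (fun x => x) ↔ k ∈ pairs.map (fun p => p.2) := by
    intro k
    rw [PySem.List.mem_sorted, PySem.Set.mem_ofList]
  apply pvUniq (fun p : String × Int => p.2)
  · exact PySem.List.sorted_pairwise pairs _
  · exact pvFlatPairwise pairs _ hks_lt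
  · intro k
    rw [pvSortedFilter, pvFlatFilter pairs k _ hnd]
    by_cases hk : k ∈ PySem.List.sorted (PySem.Set.ofList (pairs.map (fun p => p.2)))
        (fun x => x)
    · rw [if_pos hk]
    · rw [if_neg hk]
      rw [List.filter_eq_nil_iff]
      intro p hp
      simp only [beq_iff_eq]
      intro hpk
      exact hk ((hmem k).mpr (List.mem_map.mpr ⟨p, hp, hpk⟩))

-- A's driver equals B's driver once the distance functions agree
lemma pvSearchB_eq (word text : String) (trans : Bool) (f : String → String → Int)
    (hf : ∀ t, f word t = pvD trans word.toList t.toList word.toList.length t.toList.length) :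
    PySem.List.sorted ((PySem.Str.split₀ text).foldl
        (fun r token => r ++ [(token, f word token)]) []) (fun x => x.2) =
      pvSearchB word text trans := by
  unfold pvSearchB
  rw [PySem.List.foldl_append_singleton_eq_map, List.nil_append]
  have hmap : (PySem.Str.split₀ text).map (fun t => (t, f word t)) =
      (PySem.Str.split₀ text).map (fun t => (t, pvDistB word t trans)) := by
    apply List.map_congr_left
    intro t _
    rw [hf t, pvDistB_eq_pvD]
  rw [hmap]
  exact pvBuckets _

-- ===== VERDICT (by name: the statement is the Claim_ definition above) =====
theorem perform_fuzzy_search_spec : Claim_equal_perform_fuzzy_search := by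
  intro word text algorithm _ hpre
  unfold Spec_perform_fuzzy_search perform_fuzzy_search perform_fuzzy_search_alt
  rcases hpre with h | h
  · subst h
    simp only [reduceIte]
    exact pvSearchB_eq word text false levenshtein_distance (fun t => lev_eq_pvD word t)
  · subst h
    have hne : ("damerau" : String) ≠ "levenshtein" := by decide
    simp only [if_neg hne, reduceIte]
    exact pvSearchB_eq word text true damerau_levenshtein_distance (fun t => dam_eq_pvD word t)
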